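-- pv_equiv track=rewrite | github.com/jmatz123/cs440-hmm-mp4 | baseline.py | baseline
-- ===== SOURCE A (Python) =====
-- def baseline(train, test):
--     '''
--     input:  training data (list of sentences, with tags on the words)
--             test data (list of sentences, no tags on the words)
--     output: list of sentences, each sentence is a list of (word,tag) pairs.
--             E.g., [[(word1, tag1), (word2, tag2)], [(word3, tag3), (word4, tag4)]]
--     '''
--
--     tags = {}
--     final_tags = {}
--
--     for sentence in train:
--         for info in sentence:
--             word, tag = info
--
--         # add it to the dict
--             if word not in final_tags:
--                 final_tags[word] = {}
--
--             if tag not in final_tags[word]: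
--                 final_tags[word][tag] = 1
--             else:
--                 final_tags[word][tag] += 1
--
--         #     increment count
--             if tag not in tags:
--                 tags[tag] = 1
--             else:
--                 tags[tag] += 1
--
--     max_tags = max(tags, key=tags.get)
--     result = []
--
--     for sentence in test:
--         list_of_word_pairs = []
--
--         for word in sentence:
--             if word in final_tags:
--                 tag = max(final_tags[word], key=final_tags[word].get)
--                 list_of_word_pairs.append((word, tag))
--
--             else:
--                 # handles the unseen words
--                 list_of_word_pairs.append((word, max_tags))
--
--         result.append(list_of_word_pairs)
--
--     return result
-- ===== SOURCE B (Python) =====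
-- def baseline(train, test):
--     # Count tables built once; then a precomputed best-tag lookup table replaces
--     # the per-occurrence max scan of the original.
--     tags = {}
--     final_tags = {}
--     for sentence in train:
--         for word, tag in sentence:
--             wt = final_tags.setdefault(word, {})
--             wt[tag] = wt.get(tag, 0) + 1
--             tags[tag] = tags.get(tag, 0) + 1
--     default = max(tags, key=tags.get)
--     best = {word: max(counts, key=counts.get) for word, counts in final_tags.items()}
--     return [[(w, best.get(w, default)) for w in sentence] for sentence in test]
-- ===== Notes on version B (the rewrite author's own statement) =====
-- stated objective: simpler
-- what changed: B precomputes a word-to-best-tag dictionary and the global default tag once after counting, then tags the test data by plain lookups in comprehensions, instead of A's per-occurrence max scan over the word's tag-count dict inside the test loop.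
import Mathlib
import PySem

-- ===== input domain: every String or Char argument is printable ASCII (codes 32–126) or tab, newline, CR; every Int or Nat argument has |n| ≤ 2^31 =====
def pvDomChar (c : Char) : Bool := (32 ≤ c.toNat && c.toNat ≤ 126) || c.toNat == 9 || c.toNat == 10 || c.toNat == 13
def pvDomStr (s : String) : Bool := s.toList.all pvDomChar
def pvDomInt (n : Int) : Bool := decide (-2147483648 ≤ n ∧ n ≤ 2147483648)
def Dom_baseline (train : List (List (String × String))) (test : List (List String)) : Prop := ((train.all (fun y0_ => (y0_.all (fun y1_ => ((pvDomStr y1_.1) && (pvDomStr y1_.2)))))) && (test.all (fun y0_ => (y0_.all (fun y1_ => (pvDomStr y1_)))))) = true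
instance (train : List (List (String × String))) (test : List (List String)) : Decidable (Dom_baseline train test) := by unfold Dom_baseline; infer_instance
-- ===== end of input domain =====

-- B precomputes a word→best-tag table once instead of rescanning the per-word tag
-- counts at every test-word occurrence (objective: simpler second pass).

-- shared helper: Python's max(d, key=d.get) — first key with maximal count
-- (the .getD "" default is unreachable under Pre_, where every dict scanned is nonempty)
def pyMaxKey (d : PySem.Dict String Int) : String :=
  (PySem.List.max? d.keys (fun k => d.getD k 0)).getD ""

-- ===== PORT A =====
-- one training pair: A's contains-guarded updates of (tags, final_tags)
def baselineStepA (st : PySem.Dict String Int × PySem.Dict String (PySem.Dict String Int))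
    (info : String × String) :
    PySem.Dict String Int × PySem.Dict String (PySem.Dict String Int) :=
  let ft := if st.2.contains info.1 then st.2 else st.2.insert info.1 PySem.Dict.empty
  let inner := ft.getD info.1 PySem.Dict.empty
  let inner := if inner.contains info.2 then inner.insert info.2 (inner.getD info.2 0 + 1)
               else inner.insert info.2 1
  let ft := ft.insert info.1 inner
  let tags := if st.1.contains info.2 then st.1.insert info.2 (st.1.getD info.2 0 + 1)
              else st.1.insert info.2 1
  (tags, ft)

def baseline (train : List (List (String × String))) (test : List (List String)) :
    List (List (String × String)) :=
  let st := train.foldl (fun st sentence => sentence.foldl baselineStepA st)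
              (PySem.Dict.empty, PySem.Dict.empty)
  let tags := st.1
  let finalTags := st.2
  let maxTags := pyMaxKey tags
  test.foldl (fun result sentence =>
    result ++ [sentence.foldl (fun acc word =>
      if finalTags.contains word then
        acc ++ [(word, pyMaxKey (finalTags.getD word PySem.Dict.empty))]
      else
        acc ++ [(word, maxTags)]) []]) []

-- ===== PORT B =====
-- one training pair: B's setdefault + get-based updates
def baselineStepB (st : PySem.Dict String Int × PySem.Dict String (PySem.Dict String Int))
    (info : String × String) :
    PySem.Dict String Int × PySem.Dict String (PySem.Dict String Int) :=
  let ft := st.2.setdefault info.1 PySem.Dict.empty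
  let wt := ft.getD info.1 PySem.Dict.empty
  (st.1.insert info.2 (st.1.getD info.2 0 + 1),
   ft.insert info.1 (wt.insert info.2 (wt.getD info.2 0 + 1)))

def baseline_alt (train : List (List (String × String))) (test : List (List String)) :
    List (List (String × String)) :=
  let st := train.foldl (fun st sentence => sentence.foldl baselineStepB st)
              (PySem.Dict.empty, PySem.Dict.empty)
  let dflt := pyMaxKey st.1
  let best : PySem.Dict String String :=
    PySem.Dict.mk (st.2.items.map (fun p => (p.1, pyMaxKey p.2)))
  test.map (fun sentence => sentence.map (fun w => (w, best.getD w dflt)))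

-- ===== PRECONDITION & SPEC =====
-- Pre_ excludes only the inputs where A raises: with no training pair at all,
-- Python's max over the empty tags dict raises ValueError (B raises there too).
def Pre_baseline (train : List (List (String × String))) (test : List (List String)) : Prop :=
  train.any (fun s => !s.isEmpty) = true
instance (train : List (List (String × String))) (test : List (List String)) : Decidable (Pre_baseline train test) := by unfold Pre_baseline; infer_instance

def pvWitness_baseline : (List (List (String × String))) × List (List String) :=
  ([[("the", "DET"), ("cat", "N")], [("the", "N")]], [["the", "dog"]])

def Spec_baseline (train : List (List (String × String))) (test : List (List String)) (out : List (List (String × String))) : Prop := out = baseline_alt train test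
instance (train : List (List (String × String))) (test : List (List String)) (out : List (List (String × String))) : Decidable (Spec_baseline train test out) := by unfold Spec_baseline; infer_instance

-- ===== CLAIM (what is proved, stated in full; the proofs are below) =====
def Claim_equal_baseline : Prop := ∀ (train : List (List (String × String))) (test : List (List String)), Dom_baseline train test → Pre_baseline train test → Spec_baseline train test (baseline train test)

-- ===== LEMMAS AND PROOFS =====

-- the two per-pair update steps are the same function
lemma stepA_eq_stepB : baselineStepA = baselineStepB := by
  funext st info
  unfold baselineStepA baselineStepB
  obtain ⟨tags, ft⟩ := st
  obtain ⟨w, t⟩ := info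
  simp only
  have hins : ∀ (d : PySem.Dict String Int) (k : String),
      (if d.contains k then d.insert k (d.getD k 0 + 1) else d.insert k 1)
        = d.insert k (d.getD k 0 + 1) := by
    intro d k
    by_cases h : d.contains k = true
    · simp [h]
    · have h' : d.contains k = false := by simpa using h
      have : d.get? k = none := by
        rw [PySem.Dict.contains_eq_isSome_get?] at h'
        exact Option.not_isSome_iff_eq_none.mp (by simp [h'])
      simp [h', PySem.Dict.getD, this]
  by_cases hw : ft.contains w = true
  · rw [PySem.Dict.setdefault_of_contains ft _ hw]
    simp [hw, hins]
  · have hw' : ft.contains w = false := by simpa using hw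
    rw [PySem.Dict.setdefault_of_not_contains ft _ hw']
    simp [hw', hins]

-- getD on a value-mapped literal dict = map after first-match lookup
lemma getD_mk_map (l : List (String × PySem.Dict String Int))
    (f : PySem.Dict String Int → String) (w : String) (dflt : String) :
    (PySem.Dict.mk (l.map (fun p => (p.1, f p.2)))).getD w dflt =
      (((PySem.Dict.mk l).get? w).map f).getD dflt := by
  induction l with
  | nil => rfl
  | cons p rest ih =>
    obtain ⟨k, v⟩ := p
    simp only [List.map_cons, PySem.Dict.getD, PySem.Dict.get?_mk_cons] at *
    by_cases h : (k == w) = true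
    · simp [h]
    · simp only [h]
      simpa [PySem.Dict.getD] using ih

-- ===== VERDICT (by name: the statement is the Claim_ definition above) =====
theorem baseline_spec : Claim_equal_baseline := by
  intro train test _ _
  unfold Spec_baseline baseline baseline_alt
  rw [stepA_eq_stepB]
  simp only
  set st := train.foldl (fun st sentence => sentence.foldl baselineStepB st)
      (PySem.Dict.empty, PySem.Dict.empty) with hst
  -- the per-word value agrees
  have hword : ∀ w : String,
      (if st.2.contains w then
        (w, pyMaxKey (st.2.getD w PySem.Dict.empty))
       else (w, pyMaxKey st.1))
      = (w, (PySem.Dict.mk (st.2.items.map (fun p => (p.1, pyMaxKey p.2)))).getD w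
              (pyMaxKey st.1)) := by
    intro w
    rw [getD_mk_map]
    rcases hq : st.2.get? w with _ | v
    · have : st.2.contains w = false := by
        rw [PySem.Dict.contains_eq_isSome_get?, hq]; rfl
      simp [this]
    · have : st.2.contains w = true := by
        rw [PySem.Dict.contains_eq_isSome_get?, hq]; rfl
      simp [this, hq, PySem.Dict.getD]
  have hinner : ∀ sentence : List String,
      sentence.foldl (fun acc word =>
        if st.2.contains word then
          acc ++ [(word, pyMaxKey (st.2.getD word PySem.Dict.empty))]
        else acc ++ [(word, pyMaxKey st.1)]) []
      = sentence.map (fun w => (w, (PySem.Dict.mk (st.2.items.map (fun p => (p.1, pyMaxKey p.2)))).getD w (pyMaxKey st.1))) := by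
    intro sentence
    have hop : (fun (acc : List (String × String)) word =>
        if st.2.contains word then
          acc ++ [(word, pyMaxKey (st.2.getD word PySem.Dict.empty))]
        else acc ++ [(word, pyMaxKey st.1)])
      = fun acc word => acc ++ [(word, (PySem.Dict.mk (st.2.items.map (fun p => (p.1, pyMaxKey p.2)))).getD word (pyMaxKey st.1))] := by
      funext acc word
      have hw := hword word
      split_ifs with h
      · rw [if_pos h] at hw; rw [hw]
      · rw [if_neg h] at hw; rw [hw]
    rw [hop, PySem.List.foldl_append_singleton_eq_map, List.nil_append]
  have houter : (fun (result : List (List (String × String))) (sentence : List String) =>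
      result ++ [sentence.foldl (fun acc word =>
        if st.2.contains word then
          acc ++ [(word, pyMaxKey (st.2.getD word PySem.Dict.empty))]
        else acc ++ [(word, pyMaxKey st.1)]) []])
    = fun result sentence => result ++ [sentence.map (fun w => (w, (PySem.Dict.mk (st.2.items.map (fun p => (p.1, pyMaxKey p.2)))).getD w (pyMaxKey st.1)))] := by
    funext result sentence
    rw [hinner]
  rw [houter, PySem.List.foldl_append_singleton_eq_map, List.nil_append]
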